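-- pv_equiv track=rewrite | github.com/ariel1441/ai_rag_project | scripts/setup/auto_detect_schema.py | suggest_primary_key
-- ===== SOURCE A (Python) =====
-- from typing import Dict, List, Optional
--
-- def suggest_primary_key(columns: List[Dict], table_name: str) -> Optional[str]:
--     """
--     Suggest primary key column.
--
--     Common patterns:
--     - {table}_id
--     - id
--     - {table}id
--     - Primary key constraint
--     """
--     table_name_lower = table_name.lower()
--
--     # Check for explicit primary key constraint
--     # (This would require checking constraints, but for now we use patterns)
--
--     # Pattern 1: {table}_id
--     pattern1 = f"{table_name_lower}_id"
--     for col in columns: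
--         if col['name'].lower() == pattern1:
--             return col['name']
--
--     # Pattern 2: id
--     for col in columns:
--         if col['name'].lower() == 'id':
--             return col['name']
--
--     # Pattern 3: {table}id
--     pattern3 = f"{table_name_lower}id"
--     for col in columns:
--         if col['name'].lower() == pattern3:
--             return col['name']
--
--     # Pattern 4: ends with _id
--     for col in columns:
--         if col['name'].lower().endswith('_id'):
--             return col['name']
--
--     # Pattern 5: ends with id (but not _id)
--     for col in columns:
--         name_lower = col['name'].lower()
--         if name_lower.endswith('id') and not name_lower.endswith('_id'):
--             return col['name']
--
--     # Fallback: first column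
--     if columns:
--         return columns[0]['name']
--
--     return None
-- ===== SOURCE B (Python) =====
-- def suggest_primary_key(columns, table_name):
--     """One-pass min-rank scan instead of five sequential scans."""
--     t = table_name.lower()
--     p1 = t + "_id"
--     p3 = t + "id"
--
--     def rank(n):
--         if n == p1:
--             return 1
--         if n == "id":
--             return 2
--         if n == p3:
--             return 3
--         if n.endswith("_id"):
--             return 4
--         if n.endswith("id"):
--             return 5
--         return 6
--
--     best = None
--     best_rank = 6
--     for col in columns:
--         name = col['name']
--         r = rank(name.lower())
--         if r < best_rank:
--             best, best_rank = name, r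
--     if best is not None:
--         return best
--     return columns[0]['name'] if columns else None
-- ===== Notes on version B (the rewrite author's own statement) =====
-- stated objective: alternative
-- what changed: Replaces A's five sequential full scans of the column list (one per name pattern) with a single pass that assigns each column a priority rank and keeps the first column attaining the strictly smallest rank.
-- outside the precondition, e.g. on suggest_primary_key([{'type': 'int'}], 'users'): A raises KeyError, B raises KeyError
import Mathlib
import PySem

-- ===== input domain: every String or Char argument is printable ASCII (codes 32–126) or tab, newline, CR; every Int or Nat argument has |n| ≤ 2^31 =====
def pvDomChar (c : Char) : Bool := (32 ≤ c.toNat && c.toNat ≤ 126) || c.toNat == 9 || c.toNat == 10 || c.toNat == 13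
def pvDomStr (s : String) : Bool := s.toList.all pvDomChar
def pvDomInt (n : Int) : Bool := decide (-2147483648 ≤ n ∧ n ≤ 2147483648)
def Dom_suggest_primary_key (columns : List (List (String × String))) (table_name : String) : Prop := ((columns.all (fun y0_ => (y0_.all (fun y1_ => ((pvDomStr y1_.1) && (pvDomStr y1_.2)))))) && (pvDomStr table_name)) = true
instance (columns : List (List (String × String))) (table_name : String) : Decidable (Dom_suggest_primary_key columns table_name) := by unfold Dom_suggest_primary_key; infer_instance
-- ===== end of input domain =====

-- B replaces A's five sequential scans by one min-rank pass over the columns (same results).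

-- col['name'] as first-match association-list lookup; Pre_ guarantees the key exists,
-- so the "" default is never reached on admitted inputs (Python raises KeyError there).
def pvGetName (col : List (String × String)) : String :=
  ((col.find? (fun kv => kv.1 == "name")).map (·.2)).getD ""

-- ===== PORT A =====
def suggest_primary_key (columns : List (List (String × String))) (table_name : String) : Option String :=
  let t := PySem.Str.lower table_name
  let p1 := t ++ "_id"
  match columns.find? (fun c => PySem.Str.lower (pvGetName c) == p1) with
  | some c => some (pvGetName c)
  | none =>
    match columns.find? (fun c => PySem.Str.lower (pvGetName c) == "id") with
    | some c => some (pvGetName c)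
    | none =>
      let p3 := t ++ "id"
      match columns.find? (fun c => PySem.Str.lower (pvGetName c) == p3) with
      | some c => some (pvGetName c)
      | none =>
        match columns.find? (fun c => PySem.Str.endswith (PySem.Str.lower (pvGetName c)) "_id") with
        | some c => some (pvGetName c)
        | none =>
          match columns.find? (fun c =>
              PySem.Str.endswith (PySem.Str.lower (pvGetName c)) "id"
                && !PySem.Str.endswith (PySem.Str.lower (pvGetName c)) "_id") with
          | some c => some (pvGetName c)
          | none =>
            match columns with
            | [] => none
            | c :: _ => some (pvGetName c)

-- ===== PORT B =====
def pkRank (p1 p3 n : String) : Nat :=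
  if n == p1 then 1
  else if n == "id" then 2
  else if n == p3 then 3
  else if PySem.Str.endswith n "_id" then 4
  else if PySem.Str.endswith n "id" then 5
  else 6

def pkStep (p1 p3 : String) (acc : Option String × Nat) (col : List (String × String)) :
    Option String × Nat :=
  let name := pvGetName col
  let r := pkRank p1 p3 (PySem.Str.lower name)
  if r < acc.2 then (some name, r) else acc

def suggest_primary_key_alt (columns : List (List (String × String))) (table_name : String) : Option String :=
  let t := PySem.Str.lower table_name
  let best := columns.foldl (pkStep (t ++ "_id") (t ++ "id")) (none, 6)
  match best.1 with
  | some n => some n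
  | none =>
    match columns with
    | [] => none
    | c :: _ => some (pvGetName c)

-- ===== PRECONDITION & SPEC =====
-- Pre_ excludes exactly the inputs where some column dict lacks the 'name' key, on which Python A raises KeyError.
def Pre_suggest_primary_key (columns : List (List (String × String))) (table_name : String) : Prop :=
  ∀ col ∈ columns, "name" ∈ col.map Prod.fst
instance (columns : List (List (String × String))) (table_name : String) : Decidable (Pre_suggest_primary_key columns table_name) := by unfold Pre_suggest_primary_key; infer_instance

def pvWitness_suggest_primary_key : (List (List (String × String))) × String :=
  ([[("name", "user_id")], [("name", "age")]], "user")

def Spec_suggest_primary_key (columns : List (List (String × String))) (table_name : String) (out : Option String) : Prop := out = suggest_primary_key_alt columns table_name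
instance (columns : List (List (String × String))) (table_name : String) (out : Option String) : Decidable (Spec_suggest_primary_key columns table_name out) := by unfold Spec_suggest_primary_key; infer_instance

-- ===== CLAIM (what is proved, stated in full; the proofs are below) =====
def Claim_equal_suggest_primary_key : Prop := ∀ (columns : List (List (String × String))) (table_name : String), Dom_suggest_primary_key columns table_name → Pre_suggest_primary_key columns table_name → Spec_suggest_primary_key columns table_name (suggest_primary_key columns table_name)

-- ===== LEMMAS AND PROOFS =====

-- the rank B's fold assigns a column
def pkRnk (p1 p3 : String) (c : List (String × String)) : Nat :=
  pkRank p1 p3 (PySem.Str.lower (pvGetName c))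

theorem fold_stay (p1 p3 : String) (cs : List (List (String × String)))
    (o : Option String) (r : Nat) (h : ∀ c ∈ cs, r ≤ pkRnk p1 p3 c) :
    cs.foldl (pkStep p1 p3) (o, r) = (o, r) := by
  induction cs with
  | nil => rfl
  | cons x xs ih =>
    have hx := h x (by simp)
    simp only [List.foldl_cons, pkStep]
    rw [if_neg (by simpa [pkRnk] using Nat.not_lt.mpr hx)]
    exact ih (fun c hc => h c (by simp [hc]))

theorem fold_min (p1 p3 : String) (cs : List (List (String × String)))
    (o : Option String) (r k : Nat) (c : List (String × String))
    (hkr : k < r)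
    (hfind : cs.find? (fun x => pkRnk p1 p3 x == k) = some c)
    (hmin : ∀ x ∈ cs, k ≤ pkRnk p1 p3 x) :
    cs.foldl (pkStep p1 p3) (o, r) = (some (pvGetName c), k) := by
  induction cs generalizing o r with
  | nil => simp at hfind
  | cons x xs ih =>
    by_cases hx : pkRnk p1 p3 x = k
    · rw [List.find?_cons_of_pos (by simpa using hx)] at hfind
      cases hfind
      simp only [List.foldl_cons, pkStep]
      rw [if_pos (show pkRank p1 p3 (PySem.Str.lower (pvGetName c)) < r by rw [show pkRank p1 p3 (PySem.Str.lower (pvGetName c)) = k from hx]; exact hkr)]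
      rw [show pkRank p1 p3 (PySem.Str.lower (pvGetName c)) = k from hx]
      exact fold_stay p1 p3 xs _ k (fun y hy => hmin y (by simp [hy]))
    · rw [List.find?_cons_of_neg (by simpa using hx)] at hfind
      have hkx : k < pkRnk p1 p3 x :=
        lt_of_le_of_ne (hmin x (by simp)) (fun h => hx h.symm)
      simp only [List.foldl_cons, pkStep]
      by_cases hlt : pkRank p1 p3 (PySem.Str.lower (pvGetName x)) < r
      · rw [if_pos hlt]
        exact ih _ _ hkx hfind (fun y hy => hmin y (by simp [hy]))
      · rw [if_neg hlt]
        exact ih _ _ hkr hfind (fun y hy => hmin y (by simp [hy]))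

theorem find?_congr_mem {α : Type} (l : List α) (p q : α → Bool)
    (h : ∀ a ∈ l, p a = q a) : l.find? p = l.find? q := by
  induction l with
  | nil => rfl
  | cons x xs ih =>
    simp only [List.find?_cons]
    rw [h x (by simp)]
    cases q x
    · exact ih (fun a ha => h a (by simp [ha]))
    · rfl

-- ===== VERDICT (by name: the statement is the Claim_ definition above) =====
theorem suggest_primary_key_spec : Claim_equal_suggest_primary_key := by
  intro columns table_name _ _
  show suggest_primary_key columns table_name = suggest_primary_key_alt columns table_name
  unfold suggest_primary_key suggest_primary_key_alt
  simp only []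
  generalize PySem.Str.lower table_name = t
  -- abbreviations used throughout
  generalize hp1g : t ++ "_id" = p1
  generalize hp3g : t ++ "id" = p3
  -- tier 1
  cases h1 : columns.find? (fun c => PySem.Str.lower (pvGetName c) == p1) with
  | some c =>
    have hf : columns.find? (fun x => pkRnk p1 p3 x == 1) = some c := by
      rw [find?_congr_mem columns _ _ ?_]; exact h1
      intro a _; simp only [pkRnk, pkRank]
      by_cases hx : PySem.Str.lower (pvGetName a) == p1 <;> simp [hx] <;> split_ifs <;> simp
    rw [fold_min p1 p3 columns none 6 1 c (by omega) hf
      (fun x _ => by simp only [pkRnk, pkRank]; split_ifs <;> omega)]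
  | none =>
    have hn1 : ∀ x ∈ columns, (PySem.Str.lower (pvGetName x) == p1) = false := by
      intro x hx; simpa using List.find?_eq_none.mp h1 x hx
    -- tier 2
    cases h2 : columns.find? (fun c => PySem.Str.lower (pvGetName c) == "id") with
    | some c =>
      have hf : columns.find? (fun x => pkRnk p1 p3 x == 2) = some c := by
        rw [find?_congr_mem columns _ _ ?_]; exact h2
        intro a ha; simp only [pkRnk, pkRank]
        rw [if_neg (by simp [hn1 a ha])]
        by_cases hx : PySem.Str.lower (pvGetName a) == "id" <;> simp [hx] <;> split_ifs <;> simp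
      rw [fold_min p1 p3 columns none 6 2 c (by omega) hf
        (fun x hx => by simp only [pkRnk, pkRank]; rw [if_neg (by simp [hn1 x hx])]; split_ifs <;> omega)]
    | none =>
      have hn2 : ∀ x ∈ columns, (PySem.Str.lower (pvGetName x) == "id") = false := by
        intro x hx; simpa using List.find?_eq_none.mp h2 x hx
      -- tier 3
      cases h3 : columns.find? (fun c => PySem.Str.lower (pvGetName c) == p3) with
      | some c =>
        have hf : columns.find? (fun x => pkRnk p1 p3 x == 3) = some c := by
          rw [find?_congr_mem columns _ _ ?_]; exact h3
          intro a ha; simp only [pkRnk, pkRank]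
          rw [if_neg (by simp [hn1 a ha]), if_neg (by simp [hn2 a ha])]
          by_cases hx : PySem.Str.lower (pvGetName a) == p3 <;> simp [hx] <;> split_ifs <;> simp
        rw [fold_min p1 p3 columns none 6 3 c (by omega) hf
          (fun x hx => by
            simp only [pkRnk, pkRank]
            rw [if_neg (by simp [hn1 x hx]), if_neg (by simp [hn2 x hx])]
            split_ifs <;> omega)]
      | none =>
        have hn3 : ∀ x ∈ columns, (PySem.Str.lower (pvGetName x) == p3) = false := by
          intro x hx; simpa using List.find?_eq_none.mp h3 x hx
        -- tier 4
        cases h4 : columns.find? (fun c => PySem.Str.endswith (PySem.Str.lower (pvGetName c)) "_id") with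
        | some c =>
          have hf : columns.find? (fun x => pkRnk p1 p3 x == 4) = some c := by
            rw [find?_congr_mem columns _ _ ?_]; exact h4
            intro a ha; simp only [pkRnk, pkRank]
            rw [if_neg (by simp [hn1 a ha]), if_neg (by simp [hn2 a ha]), if_neg (by simp [hn3 a ha])]
            cases hx : PySem.Str.endswith (PySem.Str.lower (pvGetName a)) "_id" <;>
              (split_ifs <;> simp_all)
          rw [fold_min p1 p3 columns none 6 4 c (by omega) hf
            (fun x hx => by
              simp only [pkRnk, pkRank]
              rw [if_neg (by simp [hn1 x hx]), if_neg (by simp [hn2 x hx]), if_neg (by simp [hn3 x hx])]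
              split_ifs <;> omega)]
        | none =>
          have hn4 : ∀ x ∈ columns, PySem.Str.endswith (PySem.Str.lower (pvGetName x)) "_id" = false := by
            intro x hx
            have := List.find?_eq_none.mp h4 x hx
            simpa using Bool.of_not_eq_true this
          -- tier 5
          cases h5 : columns.find? (fun c =>
              PySem.Str.endswith (PySem.Str.lower (pvGetName c)) "id"
                && !PySem.Str.endswith (PySem.Str.lower (pvGetName c)) "_id") with
          | some c =>
            have hf : columns.find? (fun x => pkRnk p1 p3 x == 5) = some c := by
              rw [find?_congr_mem columns _ _ ?_]; exact h5
              intro a ha; simp only [pkRnk, pkRank]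
              rw [if_neg (by simp [hn1 a ha]), if_neg (by simp [hn2 a ha]), if_neg (by simp [hn3 a ha]),
                if_neg (by simp only [hn4 a ha]; decide), hn4 a ha]
              cases hx : PySem.Str.endswith (PySem.Str.lower (pvGetName a)) "id" <;>
                (split_ifs <;> simp_all)
            rw [fold_min p1 p3 columns none 6 5 c (by omega) hf
              (fun x hx => by
                simp only [pkRnk, pkRank]
                rw [if_neg (by simp [hn1 x hx]), if_neg (by simp [hn2 x hx]), if_neg (by simp [hn3 x hx]),
                  if_neg (by simp only [hn4 x hx]; decide)]
                split_ifs <;> omega)]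
          | none =>
            have hn5 : ∀ x ∈ columns,
                PySem.Str.endswith (PySem.Str.lower (pvGetName x)) "id" = false := by
              intro x hx
              have h5x := Bool.of_not_eq_true (List.find?_eq_none.mp h5 x hx)
              rw [hn4 x hx, Bool.not_false, Bool.and_true] at h5x
              exact h5x
            have hall : ∀ x ∈ columns, (6 : Nat) ≤ pkRnk p1 p3 x := by
              intro x hx
              simp only [pkRnk, pkRank]
              rw [if_neg (by simp [hn1 x hx]), if_neg (by simp [hn2 x hx]), if_neg (by simp [hn3 x hx]),
                if_neg (by simp only [hn4 x hx]; decide), if_neg (by simp only [hn5 x hx]; decide)]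
            rw [fold_stay p1 p3 columns none 6 hall]
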